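-- pv_equiv track=rewrite | github.com/jeroee/SUTD_Elective_Recommendation_System | scripts/MAP.py | clean_elective_names
-- ===== SOURCE A (Python) =====
-- def clean_elective_names(relevant_results):
--     '''
--         Change the few course names in the survey to be same as the module names scraped
--     '''
--     # clean up the relevant course names
--
--     #https://stackoverflow.com/questions/2582138/finding-and-replacing-elements-in-a-list
--     replacements = {
--         ' 50.035 Computer Vision': '50.035 Computer Vision',
--         '50.043 Database Systems / Database and Big Data Systems (for class 2021)': '50.043 Database Systems',
--     }
--
--     relevant_results = [replacements.get(x, x) for x in relevant_results]
--
--     if '40.302 Advanced Optim/ 40.305 Advanced Stochastic' in relevant_results: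
--         relevant_results.remove('40.302 Advanced Optim/ 40.305 Advanced Stochastic')
--         relevant_results.append('40.302 Advanced Topics in Optimisation#')
--         #relevant_results.append('40.305 Advanced Topics in Stochastic Modelling#')
--     return relevant_results
-- ===== SOURCE B (Python) =====
-- def clean_elective_names(relevant_results):
--     '''Single linear pass: apply replacements per element, drop the first
--     occurrence of the Advanced Optim entry via a flag, append its renamed
--     form once at the end if it was seen.'''
--     replacements = {
--         ' 50.035 Computer Vision': '50.035 Computer Vision',
--         '50.043 Database Systems / Database and Big Data Systems (for class 2021)': '50.043 Database Systems',
--     }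
--     target = '40.302 Advanced Optim/ 40.305 Advanced Stochastic'
--     out = []
--     seen = False
--     for x in relevant_results:
--         y = replacements.get(x, x)
--         if not seen and y == target:
--             seen = True
--         else:
--             out.append(y)
--     if seen:
--         out.append('40.302 Advanced Topics in Optimisation#')
--     return out
-- ===== Notes on version B (the rewrite author's own statement) =====
-- stated objective: simpler
-- what changed: Replaces the comprehension-then-membership-test-then-remove-then-append sequence (three traversals) with one linear pass that maps each element, skips the first occurrence of the target via a boolean flag, and appends the renamed course once at the end.
import Mathlib
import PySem

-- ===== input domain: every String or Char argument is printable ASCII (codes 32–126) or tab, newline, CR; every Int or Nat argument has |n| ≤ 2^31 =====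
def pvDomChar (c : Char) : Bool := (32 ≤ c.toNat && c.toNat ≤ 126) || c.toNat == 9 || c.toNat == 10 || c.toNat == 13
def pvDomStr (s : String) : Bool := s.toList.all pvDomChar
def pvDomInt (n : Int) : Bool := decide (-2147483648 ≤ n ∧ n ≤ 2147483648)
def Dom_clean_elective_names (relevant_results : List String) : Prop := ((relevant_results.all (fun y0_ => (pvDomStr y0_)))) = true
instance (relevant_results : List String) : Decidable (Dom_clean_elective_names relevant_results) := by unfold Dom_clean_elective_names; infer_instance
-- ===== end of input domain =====

-- B replaces A's three traversals (map, membership test + remove, append) by one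
-- linear pass with a first-occurrence flag; objective: simpler (same value everywhere).

-- shared literal constants (the dict and strings from the Python source)
def pvReplacements : PySem.Dict String String := PySem.Dict.ofList
  [(" 50.035 Computer Vision", "50.035 Computer Vision"),
   ("50.043 Database Systems / Database and Big Data Systems (for class 2021)", "50.043 Database Systems")]

def pvTarget : String := "40.302 Advanced Optim/ 40.305 Advanced Stochastic"
def pvAppend : String := "40.302 Advanced Topics in Optimisation#"

-- ===== PORT A =====
def clean_elective_names (relevant_results : List String) : List String :=
  let rs := relevant_results.map (fun x => pvReplacements.getD x x)
  if rs.contains pvTarget then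
    ((PySem.List.remove? rs pvTarget).getD rs) ++ [pvAppend]
  else
    rs

-- ===== PORT B =====
def clean_elective_names_alt (relevant_results : List String) : List String :=
  let p := relevant_results.foldl
    (fun (st : List String × Bool) x =>
      let y := pvReplacements.getD x x
      if !st.2 && y == pvTarget then (st.1, true) else (st.1 ++ [y], st.2))
    ([], false)
  if p.2 then p.1 ++ [pvAppend] else p.1

-- ===== PRECONDITION & SPEC =====
def Spec_clean_elective_names (relevant_results : List String) (out : List String) : Prop := out = clean_elective_names_alt relevant_results
instance (relevant_results : List String) (out : List String) : Decidable (Spec_clean_elective_names relevant_results out) := by unfold Spec_clean_elective_names; infer_instance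

-- ===== CLAIM (what is proved, stated in full; the proofs are below) =====
def Claim_equal_clean_elective_names : Prop := ∀ (relevant_results : List String), Dom_clean_elective_names relevant_results → Spec_clean_elective_names relevant_results (clean_elective_names relevant_results)

-- ===== LEMMAS AND PROOFS =====

def pvStep (st : List String × Bool) (x : String) : List String × Bool :=
  let y := pvReplacements.getD x x
  if !st.2 && y == pvTarget then (st.1, true) else (st.1 ++ [y], st.2)

theorem pvStep_eq : (fun (st : List String × Bool) x =>
    let y := pvReplacements.getD x x
    if !st.2 && y == pvTarget then (st.1, true) else (st.1 ++ [y], st.2)) = pvStep := rfl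

theorem foldl_pvStep_true (xs : List String) : ∀ (acc : List String),
    xs.foldl pvStep (acc, true) = (acc ++ xs.map (fun x => pvReplacements.getD x x), true) := by
  induction xs with
  | nil => intro acc; simp
  | cons x xs ih =>
    intro acc
    simp only [List.foldl_cons, List.map_cons, pvStep]
    simpa [List.append_assoc] using ih (acc ++ [pvReplacements.getD x x])

theorem foldl_pvStep_false (xs : List String) : ∀ (acc : List String),
    xs.foldl pvStep (acc, false) =
      match PySem.List.remove? (xs.map (fun x => pvReplacements.getD x x)) pvTarget with
      | some ys => (acc ++ ys, true)
      | none => (acc ++ xs.map (fun x => pvReplacements.getD x x), false) := by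
  induction xs with
  | nil => intro acc; simp [PySem.List.remove?]
  | cons x xs ih =>
    intro acc
    by_cases h : pvReplacements.getD x x = pvTarget
    · simp [pvStep, h, foldl_pvStep_true, PySem.List.remove?_cons_self]
    · have hne : pvReplacements.getD x x ≠ pvTarget := h
      simp only [List.foldl_cons, List.map_cons, pvStep,
        PySem.List.remove?_cons_of_ne _ hne]
      have hbe : (pvReplacements.getD x x == pvTarget) = false := by
        simpa using h
      simp only [hbe, Bool.and_false, Bool.false_eq_true, if_false]
      rw [ih (acc ++ [pvReplacements.getD x x])]
      cases hrem : PySem.List.remove? (xs.map (fun x => pvReplacements.getD x x)) pvTarget with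
      | some ys => simp [List.append_assoc]
      | none => simp [List.append_assoc]

-- ===== VERDICT (by name: the statement is the Claim_ definition above) =====
theorem clean_elective_names_spec : Claim_equal_clean_elective_names := by
  intro rs _
  unfold Spec_clean_elective_names clean_elective_names clean_elective_names_alt
  rw [pvStep_eq, foldl_pvStep_false rs []]
  cases hrem : PySem.List.remove? (rs.map (fun x => pvReplacements.getD x x)) pvTarget with
  | some ys =>
    have hmem : pvTarget ∈ rs.map (fun x => pvReplacements.getD x x) := by
      by_contra hnot
      rw [← PySem.List.remove?_eq_none_iff _ pvTarget] at hnot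
      simp [hnot] at hrem
    simp [hrem, hmem]
  | none =>
    have hnot : pvTarget ∉ rs.map (fun x => pvReplacements.getD x x) :=
      (PySem.List.remove?_eq_none_iff _ _).mp hrem
    simp [hnot]
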